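-- pv_equiv track=rewrite | github.com/HangSingHui/ubs_coding_challenge | routes/dodge_bullet.py | move_bullets
-- ===== SOURCE A (Python) =====
-- BULLET_MOVES = {
--     'u': (-1, 0),  # up
--     'd': (1, 0),   # down
--     'l': (0, -1),  # left
--     'r': (0, 1)    # right
-- }
--
-- def move_bullets(map_data):
--     rows, cols = len(map_data), len(map_data[0])
--     new_map = [['.' for _ in range(cols)] for _ in range(rows)]
--
--     for i in range(rows):
--         for j in range(cols):
--             if map_data[i][j] in BULLET_MOVES:
--                 dx, dy = BULLET_MOVES[map_data[i][j]]
--                 new_x, new_y = i + dx, j + dy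
--                 if 0 <= new_x < rows and 0 <= new_y < cols:
--                     new_map[new_x][new_y] = map_data[i][j]
--
--     return new_map
-- ===== SOURCE B (Python) =====
-- def move_bullets(map_data):
--     rows, cols = len(map_data), len(map_data[0])
--
--     def cell(x, y):
--         # gather: which neighbor fires a bullet into (x, y); priority u > l > r > d
--         # reproduces the row-major last-writer-wins of a scatter pass
--         if x + 1 < rows and map_data[x + 1][y] == 'u':
--             return 'u'
--         if y + 1 < cols and map_data[x][y + 1] == 'l':
--             return 'l'
--         if y >= 1 and map_data[x][y - 1] == 'r':
--             return 'r'
--         if x >= 1 and map_data[x - 1][y] == 'd':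
--             return 'd'
--         return '.'
--
--     return [[cell(x, y) for y in range(cols)] for x in range(rows)]
-- ===== Notes on version B (the rewrite author's own statement) =====
-- stated objective: alternative
-- what changed: B inverts A's scatter pass (push each bullet forward over a mutable grid, row-major last write wins) into a single gather pass that builds each output cell directly by consulting its four neighbours in the priority u > l > r > d.
-- outside the precondition, e.g. on move_bullets([]): A raises IndexError, B raises IndexError; on move_bullets([['u', 'd'], ['l']]): A raises IndexError, B raises IndexError
import Mathlib
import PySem

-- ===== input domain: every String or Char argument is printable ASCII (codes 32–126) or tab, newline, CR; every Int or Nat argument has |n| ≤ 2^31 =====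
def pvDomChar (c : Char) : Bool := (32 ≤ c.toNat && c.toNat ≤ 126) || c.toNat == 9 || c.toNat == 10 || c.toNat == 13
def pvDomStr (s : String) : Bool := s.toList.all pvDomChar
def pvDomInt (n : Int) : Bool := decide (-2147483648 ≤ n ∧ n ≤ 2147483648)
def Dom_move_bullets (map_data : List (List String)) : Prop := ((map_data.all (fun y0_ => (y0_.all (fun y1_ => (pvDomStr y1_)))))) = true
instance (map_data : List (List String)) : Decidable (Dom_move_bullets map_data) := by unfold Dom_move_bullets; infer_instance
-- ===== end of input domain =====

-- B replaces A's scatter pass (push each bullet forward, row-major last write wins) by a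
-- gather pass (each target cell pulls from its four neighbours in priority u > l > r > d);
-- same asymptotic cost, equivalence about the RETURN value (A mutates only its fresh grid).

-- ===== PORT A =====
def BULLET_MOVES : PySem.Dict String (Int × Int) :=
  PySem.Dict.mk [("u", (-1, 0)), ("d", (1, 0)), ("l", (0, -1)), ("r", (0, 1))]

def move_bullets (map_data : List (List String)) : List (List String) :=
  let rows := map_data.length
  let cols := (map_data.headD []).length
  let new0 : List (List String) := List.replicate rows (List.replicate cols ".")
  (List.range rows).foldl (fun nm i =>
    (List.range cols).foldl (fun nm j =>
      match PySem.Dict.get? BULLET_MOVES ((map_data.getD i []).getD j "") with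
      | some dxy =>
          let nx : Int := (i : Int) + dxy.1
          let ny : Int := (j : Int) + dxy.2
          if 0 ≤ nx ∧ nx < (rows : Int) ∧ 0 ≤ ny ∧ ny < (cols : Int) then
            nm.set nx.toNat ((nm.getD nx.toNat []).set ny.toNat ((map_data.getD i []).getD j ""))
          else nm
      | none => nm) nm) new0

-- ===== PORT B =====
def cellPull (map_data : List (List String)) (rows cols x y : Nat) : String :=
  if x + 1 < rows ∧ (map_data.getD (x + 1) []).getD y "" = "u" then "u"
  else if y + 1 < cols ∧ (map_data.getD x []).getD (y + 1) "" = "l" then "l"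
  else if 1 ≤ y ∧ (map_data.getD x []).getD (y - 1) "" = "r" then "r"
  else if 1 ≤ x ∧ (map_data.getD (x - 1) []).getD y "" = "d" then "d"
  else "."

def move_bullets_alt (map_data : List (List String)) : List (List String) :=
  let rows := map_data.length
  let cols := (map_data.headD []).length
  (List.range rows).map (fun x => (List.range cols).map (fun y => cellPull map_data rows cols x y))

-- ===== PRECONDITION & SPEC =====
-- Pre_ excludes exactly the inputs on which the Python A raises IndexError:
-- the empty grid (map_data[0]) and grids where some row is shorter than the first row.
def Pre_move_bullets (map_data : List (List String)) : Prop :=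
  map_data ≠ [] ∧ ∀ row ∈ map_data, (map_data.headD []).length ≤ row.length
instance (map_data : List (List String)) : Decidable (Pre_move_bullets map_data) := by
  unfold Pre_move_bullets; infer_instance
def pvWitness_move_bullets : List (List String) := [[".", "l"], ["u", "r"]]

def Spec_move_bullets (map_data : List (List String)) (out : List (List String)) : Prop := out = move_bullets_alt map_data
instance (map_data : List (List String)) (out : List (List String)) : Decidable (Spec_move_bullets map_data out) := by unfold Spec_move_bullets; infer_instance

-- ===== CLAIM (what is proved, stated in full; the proofs are below) =====
def Claim_equal_move_bullets : Prop := ∀ (map_data : List (List String)), Dom_move_bullets map_data → Pre_move_bullets map_data → Spec_move_bullets map_data (move_bullets map_data)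

-- ===== LEMMAS AND PROOFS =====

-- the scatter step of A, as a function of one source cell (i, j)
def bstep (map_data : List (List String)) (rows cols : Nat)
    (nm : List (List String)) (s : Nat × Nat) : List (List String) :=
  match PySem.Dict.get? BULLET_MOVES ((map_data.getD s.1 []).getD s.2 "") with
  | some dxy =>
      let nx : Int := (s.1 : Int) + dxy.1
      let ny : Int := (s.2 : Int) + dxy.2
      if 0 ≤ nx ∧ nx < (rows : Int) ∧ 0 ≤ ny ∧ ny < (cols : Int) then
        nm.set nx.toNat ((nm.getD nx.toNat []).set ny.toNat ((map_data.getD s.1 []).getD s.2 ""))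
      else nm
  | none => nm

-- what source (i, j) writes into target cell (x, y), if anything
def bwrite (map_data : List (List String)) (rows cols i j x y : Nat) : Option String :=
  match PySem.Dict.get? BULLET_MOVES ((map_data.getD i []).getD j "") with
  | some dxy =>
      let nx : Int := (i : Int) + dxy.1
      let ny : Int := (j : Int) + dxy.2
      if (0 ≤ nx ∧ nx < (rows : Int) ∧ 0 ≤ ny ∧ ny < (cols : Int)) ∧ nx = (x : Int) ∧ ny = (y : Int)
      then some ((map_data.getD i []).getD j "") else none
  | none => none

def srcs (rows cols : Nat) : List (Nat × Nat) :=
  (List.range rows).flatMap (fun i => (List.range cols).map (fun j => (i, j)))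

def tgts (rows cols x y : Nat) : List (Nat × Nat) :=
  (if x + 1 < rows then [(x + 1, y)] else []) ++
  (if y + 1 < cols then [(x, y + 1)] else []) ++
  (if 1 ≤ y then [(x, y - 1)] else []) ++
  (if 1 ≤ x then [(x - 1, y)] else [])

def Shape (rows cols : Nat) (nm : List (List String)) : Prop :=
  nm.length = rows ∧ ∀ r ∈ nm, r.length = cols

-- strict "later in row-major order" on source coordinates
def lexGT (a b : Nat × Nat) : Prop := b.1 < a.1 ∨ (b.1 = a.1 ∧ b.2 < a.2)

theorem get_BM (s : String) : PySem.Dict.get? BULLET_MOVES s =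
    if s = "u" then some (-1, 0) else if s = "d" then some (1, 0)
    else if s = "l" then some (0, -1) else if s = "r" then some (0, 1) else none := by
  split_ifs with h1 h2 h3 h4
  · subst h1; decide
  · subst h2; decide
  · subst h3; decide
  · subst h4; decide
  · have e1 : ("u" == s) = false := by simp [Ne.symm h1]
    have e2 : ("d" == s) = false := by simp [Ne.symm h2]
    have e3 : ("l" == s) = false := by simp [Ne.symm h3]
    have e4 : ("r" == s) = false := by simp [Ne.symm h4]
    simp [BULLET_MOVES, PySem.Dict.get?, List.find?, e1, e2, e3, e4]

theorem A_eq_foldl (map_data : List (List String)) :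
    move_bullets map_data =
    (srcs map_data.length (map_data.headD []).length).foldl
      (bstep map_data map_data.length (map_data.headD []).length)
      (List.replicate map_data.length (List.replicate (map_data.headD []).length ".")) := by
  simp only [move_bullets, srcs, bstep, List.foldl_flatMap, List.foldl_map]

theorem shape_bstep (map_data : List (List String)) (rows cols : Nat) (nm : List (List String))
    (s : Nat × Nat) (h : Shape rows cols nm) : Shape rows cols (bstep map_data rows cols nm s) := by
  obtain ⟨hlen, hrow⟩ := h
  unfold bstep
  cases hget : PySem.Dict.get? BULLET_MOVES ((map_data.getD s.1 []).getD s.2 "") with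
  | none => exact ⟨hlen, hrow⟩
  | some dxy =>
    simp only
    split_ifs with hb
    · obtain ⟨hb1, hb2, hb3, hb4⟩ := hb
      have hlt : ((s.1 : Int) + dxy.1).toNat < nm.length := by omega
      refine ⟨by simp [hlen], ?_⟩
      intro r hr
      rcases List.mem_or_eq_of_mem_set hr with h' | rfl
      · exact hrow r h'
      · rw [List.length_set, List.getD_eq_getElem _ _ hlt]
        exact hrow _ (List.getElem_mem hlt)
    · exact ⟨hlen, hrow⟩

theorem shape_foldl (map_data : List (List String)) (rows cols : Nat)
    (L : List (Nat × Nat)) (nm : List (List String)) (h : Shape rows cols nm) :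
    Shape rows cols (L.foldl (bstep map_data rows cols) nm) := by
  induction L generalizing nm with
  | nil => exact h
  | cons s L ih => exact ih _ (shape_bstep _ _ _ _ _ h)

theorem get_bstep (map_data : List (List String)) (rows cols : Nat) (nm : List (List String))
    (s : Nat × Nat) (x y : Nat) (hx : x < rows) (hy : y < cols) (hsh : Shape rows cols nm) :
    ((bstep map_data rows cols nm s).getD x []).getD y "" =
    (bwrite map_data rows cols s.1 s.2 x y).getD ((nm.getD x []).getD y "") := by
  obtain ⟨hlen, hrow⟩ := hsh
  unfold bstep bwrite
  cases hget : PySem.Dict.get? BULLET_MOVES ((map_data.getD s.1 []).getD s.2 "") with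
  | none => simp
  | some dxy =>
    simp only
    by_cases hb : 0 ≤ (s.1 : Int) + dxy.1 ∧ (s.1 : Int) + dxy.1 < (rows : Int) ∧
        0 ≤ (s.2 : Int) + dxy.2 ∧ (s.2 : Int) + dxy.2 < (cols : Int)
    · rw [if_pos hb]
      obtain ⟨hb1, hb2, hb3, hb4⟩ := hb
      by_cases heq : (s.1 : Int) + dxy.1 = (x : Int) ∧ (s.2 : Int) + dxy.2 = (y : Int)
      · rw [if_pos ⟨⟨hb1, hb2, hb3, hb4⟩, heq⟩]
        have hxlt : x < nm.length := by omega
        have hrl : (nm.getD x []).length = cols := by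
          rw [List.getD_eq_getElem _ _ hxlt]; exact hrow _ (List.getElem_mem hxlt)
        have h1 : ((s.1 : Int) + dxy.1).toNat = x := by omega
        have h2 : ((s.2 : Int) + dxy.2).toNat = y := by omega
        have hy' : y < (nm.getD x []).length := by rw [hrl]; exact hy
        rw [h1, h2]
        rw [show (nm.set x ((nm.getD x []).set y ((map_data.getD s.1 []).getD s.2 ""))).getD x []
            = (nm.getD x []).set y ((map_data.getD s.1 []).getD s.2 "") from by
          rw [List.getD_eq_getElem?_getD, List.getElem?_set_self hxlt, Option.getD_some]]
        rw [List.getD_eq_getElem?_getD, List.getElem?_set_self hy']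
        simp
      · rw [if_neg (by tauto)]
        by_cases hrx : ((s.1 : Int) + dxy.1).toNat = x
        · have hcy : ((s.2 : Int) + dxy.2).toNat ≠ y := by omega
          have hxlt : x < nm.length := by omega
          rw [hrx]
          rw [show (nm.set x ((nm.getD x []).set ((↑s.2 + dxy.2).toNat)
              ((map_data.getD s.1 []).getD s.2 ""))).getD x []
              = (nm.getD x []).set ((↑s.2 + dxy.2).toNat) ((map_data.getD s.1 []).getD s.2 "") from by
            rw [List.getD_eq_getElem?_getD, List.getElem?_set_self hxlt, Option.getD_some]]
          rw [List.getD_eq_getElem?_getD, List.getElem?_set_ne hcy, ← List.getD_eq_getElem?_getD]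
          simp
        · rw [show (nm.set ((↑s.1 + dxy.1).toNat) ((nm.getD ((↑s.1 + dxy.1).toNat) []).set
              ((↑s.2 + dxy.2).toNat) ((map_data.getD s.1 []).getD s.2 ""))).getD x []
              = nm.getD x [] from by
            simp [List.getD_eq_getElem?_getD, List.getElem?_set_ne hrx]]
          simp
    · rw [if_neg hb, if_neg (by tauto)]
      simp

theorem foldl_get (map_data : List (List String)) (rows cols : Nat)
    (L : List (Nat × Nat)) (nm : List (List String)) (x y : Nat)
    (hx : x < rows) (hy : y < cols) (hsh : Shape rows cols nm) :
    ((L.foldl (bstep map_data rows cols) nm).getD x []).getD y "" =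
    (L.reverse.findSome? (fun s => bwrite map_data rows cols s.1 s.2 x y)).getD
      ((nm.getD x []).getD y "") := by
  induction L generalizing nm with
  | nil => simp
  | cons s L ih =>
    rw [List.foldl_cons, ih _ (shape_bstep _ _ _ _ _ hsh), get_bstep _ _ _ _ _ _ _ hx hy hsh]
    rw [List.reverse_cons, List.findSome?_append]
    cases h : L.reverse.findSome? (fun s => bwrite map_data rows cols s.1 s.2 x y) <;>
      cases hb : bwrite map_data rows cols s.1 s.2 x y <;> simp [List.findSome?, hb]

theorem mem_srcs (rows cols : Nat) (s : Nat × Nat) :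
    s ∈ srcs rows cols ↔ s.1 < rows ∧ s.2 < cols := by
  cases s; simp [srcs]

theorem mem_tgts (rows cols x y : Nat) (s : Nat × Nat) :
    s ∈ tgts rows cols x y ↔
      (s = (x + 1, y) ∧ x + 1 < rows) ∨ (s = (x, y + 1) ∧ y + 1 < cols) ∨
      (s = (x, y - 1) ∧ 1 ≤ y) ∨ (s = (x - 1, y) ∧ 1 ≤ x) := by
  obtain ⟨a, b⟩ := s
  unfold tgts
  split_ifs <;> simp_all [Prod.mk.injEq] <;> omega

theorem pairwise_srcs (rows cols : Nat) :
    (srcs rows cols).Pairwise (fun a b => lexGT b a) := by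
  induction rows with
  | zero => simp [srcs]
  | succ n ih =>
    unfold srcs
    rw [List.range_succ, List.flatMap_append, List.pairwise_append]
    refine ⟨ih, ?_, ?_⟩
    · simp only [List.flatMap_cons, List.flatMap_nil, List.append_nil]
      refine List.Pairwise.map _ ?_ List.pairwise_lt_range
      intro a b hab
      exact Or.inr ⟨rfl, hab⟩
    · intro a ha b hb
      have ha' : a.1 < n ∧ a.2 < cols := (mem_srcs n cols a).mp ha
      simp only [List.flatMap_cons, List.flatMap_nil, List.append_nil, List.mem_map,
        List.mem_range] at hb
      obtain ⟨j, hj, rfl⟩ := hb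
      exact Or.inl ha'.1

-- generic: findSome? over a nodup list whose hits all lie in a sublist ts equals findSome? over ts
theorem findSome?_eq_targets {α β : Type} (l ts : List α) (f : α → Option β)
    (hnd : l.Nodup) (hsub : ts.Sublist l) (hhit : ∀ a ∈ l, f a ≠ none → a ∈ ts) :
    l.findSome? f = ts.findSome? f := by
  induction l generalizing ts with
  | nil => rw [List.sublist_nil.mp hsub]
  | cons a l ih =>
    rcases List.sublist_cons_iff.mp hsub with h | ⟨r, rfl, hr⟩
    · have hfa : f a = none := by
        by_cases hf : f a = none
        · exact hf
        · exact absurd (h.subset (hhit a List.mem_cons_self hf)) (List.nodup_cons.mp hnd).1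
      rw [List.findSome?_cons, hfa]
      exact ih ts (List.nodup_cons.mp hnd).2 h
        (fun b hb hfb => hhit b (List.mem_cons_of_mem _ hb) hfb)
    · rw [List.findSome?_cons, List.findSome?_cons]
      cases hfa : f a with
      | some c => rfl
      | none =>
        refine ih r (List.nodup_cons.mp hnd).2 hr (fun b hb hfb => ?_)
        rcases List.mem_cons.mp (hhit b (List.mem_cons_of_mem _ hb) hfb) with rfl | h1
        · exact absurd hb (List.nodup_cons.mp hnd).1
        · exact h1

-- a list sorted by the same strict order and included in l is a sublist of l
theorem sublist_of_subset_sorted (l ts : List (Nat × Nat))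
    (hl : l.Pairwise lexGT) (hts : ts.Pairwise lexGT) (hsub : ts ⊆ l) : ts.Sublist l := by
  induction l generalizing ts with
  | nil => rw [List.subset_nil.mp hsub]
  | cons a l ih =>
    cases ts with
    | nil => exact List.nil_sublist _
    | cons t ts =>
      have hlex_irr : ∀ p : Nat × Nat, ¬ lexGT p p := by intro p; simp [lexGT]
      have hlex_asym : ∀ p q : Nat × Nat, lexGT p q → ¬ lexGT q p := by
        intro p q h1 h2
        rcases h1 with h1 | h1 <;> rcases h2 with h2 | h2 <;> omega
      have hl' : l.Pairwise lexGT := (List.pairwise_cons.mp hl).2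
      have hts' : ts.Pairwise lexGT := (List.pairwise_cons.mp hts).2
      rcases List.mem_cons.mp (hsub List.mem_cons_self) with rfl | hta
      · refine List.Sublist.cons₂ _ (ih ts hl' hts' ?_)
        intro s hs
        rcases List.mem_cons.mp (hsub (List.mem_cons_of_mem _ hs)) with rfl | h
        · exact absurd ((List.pairwise_cons.mp hts).1 s hs) (hlex_irr s)
        · exact h
      · refine List.Sublist.cons _ (ih (t :: ts) hl' hts ?_)
        intro s hs
        rcases List.mem_cons.mp (hsub hs) with rfl | h
        · rcases List.mem_cons.mp hs with rfl | hs'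
          · exact hta
          · exact absurd ((List.pairwise_cons.mp hts).1 s hs')
              (hlex_asym _ _ ((List.pairwise_cons.mp hl).1 t hta))
        · exact h

theorem bwrite_only_neighbors (map_data : List (List String)) (rows cols i j x y : Nat)
    (hi : i < rows) (hj : j < cols)
    (hne : bwrite map_data rows cols i j x y ≠ none) : (i, j) ∈ tgts rows cols x y := by
  rw [mem_tgts]
  simp only [Prod.mk.injEq]
  unfold bwrite at hne
  rw [get_BM] at hne
  split_ifs at hne <;> simp at hne <;> omega

theorem bwrite_u (map_data : List (List String)) (rows cols x y : Nat)
    (h : x + 1 < rows) (hy : y < cols) :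
    bwrite map_data rows cols (x + 1) y x y =
    (if (map_data.getD (x + 1) []).getD y "" = "u" then some "u" else none) := by
  unfold bwrite
  rw [get_BM]
  split_ifs <;> simp_all <;> omega

theorem bwrite_l (map_data : List (List String)) (rows cols x y : Nat)
    (h : y + 1 < cols) (hx : x < rows) :
    bwrite map_data rows cols x (y + 1) x y =
    (if (map_data.getD x []).getD (y + 1) "" = "l" then some "l" else none) := by
  unfold bwrite
  rw [get_BM]
  split_ifs <;> simp_all <;> omega

theorem bwrite_r (map_data : List (List String)) (rows cols x y : Nat)
    (h : 1 ≤ y) (hx : x < rows) (hy : y < cols) :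
    bwrite map_data rows cols x (y - 1) x y =
    (if (map_data.getD x []).getD (y - 1) "" = "r" then some "r" else none) := by
  unfold bwrite
  rw [get_BM]
  split_ifs <;> simp_all <;> omega

theorem bwrite_d (map_data : List (List String)) (rows cols x y : Nat)
    (h : 1 ≤ x) (hx : x < rows) (hy : y < cols) :
    bwrite map_data rows cols (x - 1) y x y =
    (if (map_data.getD (x - 1) []).getD y "" = "d" then some "d" else none) := by
  unfold bwrite
  rw [get_BM]
  split_ifs <;> simp_all <;> omega

set_option maxHeartbeats 2000000 in
theorem gather_eq (map_data : List (List String)) (rows cols x y : Nat)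
    (hx : x < rows) (hy : y < cols) :
    ((tgts rows cols x y).findSome? (fun s => bwrite map_data rows cols s.1 s.2 x y)).getD "." =
    cellPull map_data rows cols x y := by
  have eu := fun h => bwrite_u map_data rows cols x y h hy
  have el := fun h => bwrite_l map_data rows cols x y h hx
  have er := fun h => bwrite_r map_data rows cols x y h hx hy
  have ed := fun h => bwrite_d map_data rows cols x y h hx hy
  unfold tgts cellPull
  by_cases h1 : x + 1 < rows <;> by_cases h2 : y + 1 < cols <;>
    by_cases h3 : 1 ≤ y <;> by_cases h4 : 1 ≤ x <;>
    simp only [h1, h2, h3, h4, if_true, if_false, true_and, false_and, List.nil_append,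
      List.append_nil, List.cons_append, List.findSome?_cons, List.findSome?_nil,
      eu, el, er, ed] <;>
    first
      | rfl
      | (split_ifs <;> rfl)

theorem pairwise_tgts (rows cols x y : Nat) :
    (tgts rows cols x y).Pairwise lexGT := by
  unfold tgts
  split_ifs <;> simp_all [List.pairwise_cons, lexGT] <;> omega

theorem tgts_subset (rows cols x y : Nat) (hx : x < rows) (hy : y < cols) :
    tgts rows cols x y ⊆ (srcs rows cols).reverse := by
  intro s hs
  rw [List.mem_reverse, mem_srcs]
  rcases (mem_tgts rows cols x y s).mp hs with ⟨rfl, h⟩ | ⟨rfl, h⟩ | ⟨rfl, h⟩ | ⟨rfl, h⟩ <;>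
    constructor <;> simp <;> omega

-- ===== VERDICT (by name: the statement is the Claim_ definition above) =====
theorem move_bullets_spec : Claim_equal_move_bullets := by
  intro map_data _ _
  unfold Spec_move_bullets
  rw [A_eq_foldl]
  have hsh0 : Shape map_data.length (map_data.headD []).length
      (List.replicate map_data.length (List.replicate (map_data.headD []).length ".")) := by
    refine ⟨List.length_replicate, ?_⟩
    intro r hr
    rw [List.eq_of_mem_replicate hr, List.length_replicate]
  have hshF := shape_foldl map_data map_data.length (map_data.headD []).length
    (srcs map_data.length (map_data.headD []).length) _ hsh0
  have hsorted : ((srcs map_data.length (map_data.headD []).length).reverse).Pairwise lexGT :=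
    List.pairwise_reverse.mpr (pairwise_srcs _ _)
  have hnd : ((srcs map_data.length (map_data.headD []).length).reverse).Nodup :=
    hsorted.imp (fun h => by rintro rfl; simp [lexGT] at h)
  apply List.ext_getElem
  · rw [hshF.1]
    simp [move_bullets_alt]
  · intro x hx1 hx2
    have hxr : x < map_data.length := by rwa [hshF.1] at hx1
    apply List.ext_getElem
    · rw [hshF.2 _ (List.getElem_mem hx1)]
      simp [move_bullets_alt]
    · intro y hy1 hy2
      have hyc : y < (map_data.headD []).length := by
        rwa [hshF.2 _ (List.getElem_mem hx1)] at hy1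
      have hR : ((move_bullets_alt map_data)[x]'hx2)[y]'hy2 =
          cellPull map_data map_data.length (map_data.headD []).length x y := by
        simp [move_bullets_alt]
      rw [hR, ← List.getD_eq_getElem _ "" hy1, ← List.getD_eq_getElem _ [] hx1,
        foldl_get map_data map_data.length (map_data.headD []).length _ _ x y hxr hyc hsh0,
        List.getD_replicate _ hxr, List.getD_replicate _ hyc,
        findSome?_eq_targets _ (tgts map_data.length (map_data.headD []).length x y) _ hnd
          (sublist_of_subset_sorted _ _ hsorted (pairwise_tgts _ _ x y)
            (tgts_subset _ _ x y hxr hyc))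
          (fun s hs hf => by
            have hm := (mem_srcs _ _ s).mp (List.mem_reverse.mp hs)
            have h' := bwrite_only_neighbors map_data _ _ s.1 s.2 x y hm.1 hm.2 hf
            exact (by cases s; exact h'))]
      exact gather_eq map_data _ _ x y hxr hyc
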